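-- pv_equiv track=rewrite | github.com/LGeoff31/leetcode-solutions | 3638-maximum-balanced-shipments/3638. Maximum Balanced Shipments.py | maxBalancedShipments
-- ===== SOURCE A (Python) =====
-- from typing import List
--
-- def maxBalancedShipments(weight: List[int]) -> int:
--     curr = 1
--     i = len(weight) - 2
--     res = 0
--     min_so_far = weight[-1]
--     for i in range(len(weight) -2, -1, -1):
--         if weight[i] > min_so_far:
--             res += 1
--             if i == 0:
--                 break
--             min_so_far = weight[i-1]
--         else:
--             min_so_far = weight[i]
--     return res
-- ===== SOURCE B (Python) =====
-- from typing import List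
--
-- def maxBalancedShipments(weight: List[int]) -> int:
--     # Forward greedy: track the running max of the current group; close a
--     # shipment at the first element strictly below it, then start fresh.
--     res = 0
--     cur_max = weight[0]
--     for w in weight[1:]:
--         if cur_max is not None and w < cur_max:
--             res += 1
--             cur_max = None
--         elif cur_max is None:
--             cur_max = w
--         else:
--             cur_max = max(cur_max, w)
--     return res
-- ===== Notes on version B (the rewrite author's own statement) =====
-- stated objective: alternative
-- what changed: Replaces A's right-to-left index loop (range(len-2,-1,-1) with min-so-far tracking, a break flag and index lookups weight[i], weight[i-1]) by a forward left-to-right single pass over the elements that tracks the current group's running maximum with a None sentinel and closes a shipment at the first element strictly below it; equivalence of the two traversal directions is proved in Lean.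
import Mathlib
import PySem

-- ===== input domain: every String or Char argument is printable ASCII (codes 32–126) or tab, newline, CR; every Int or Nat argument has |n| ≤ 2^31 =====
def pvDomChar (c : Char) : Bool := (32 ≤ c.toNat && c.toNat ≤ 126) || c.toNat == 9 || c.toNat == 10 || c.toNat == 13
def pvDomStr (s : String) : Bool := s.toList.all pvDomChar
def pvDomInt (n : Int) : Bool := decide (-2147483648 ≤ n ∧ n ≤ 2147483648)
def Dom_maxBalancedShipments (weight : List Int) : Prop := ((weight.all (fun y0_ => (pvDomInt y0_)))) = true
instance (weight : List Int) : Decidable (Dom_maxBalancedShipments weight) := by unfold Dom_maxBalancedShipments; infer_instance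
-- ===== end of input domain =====

-- B replaces A's right-to-left min-tracking index loop by a forward left-to-right greedy
-- over the elements tracking the current group's running max (objective: alternative;
-- the equivalence of the two traversal directions is what is proved here).

-- ===== PORT A =====
-- loop body of A's 'for i in range(len(weight)-2, -1, -1)' loop (state: res, min_so_far, broke)
def aStep (weight : List Int) (st : Int × Int × Bool) (i : Int) : Int × Int × Bool :=
  match st with
  | (res, minSoFar, broke) =>
    if broke then (res, minSoFar, broke)
    else
      let wi := (PySem.List.pyGet? weight i).getD 0
      if wi > minSoFar then
        if i = 0 then (res + 1, minSoFar, true)          -- 'if i == 0: break'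
        else (res + 1, (PySem.List.pyGet? weight (i - 1)).getD 0, false)
      else (res, wi, false)

-- port of A ('curr = 1' and the pre-loop 'i = len(weight) - 2' are dead and not ported;
-- weight[-1] raises IndexError on [] — excluded by Pre_)
def maxBalancedShipments (weight : List Int) : Int :=
  let minSoFar0 := (PySem.List.pyGet? weight (-1)).getD 0
  ((PySem.List.pyRange ((weight.length : Int) - 2) (-1) (-1)).foldl
      (aStep weight) (0, minSoFar0, false)).1

-- ===== PORT B =====
-- port of B (Source B): forward greedy; 'cur_max = weight[0]' raises IndexError on [] — excluded by Pre_
def maxBalancedShipments_alt (weight : List Int) : Int :=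
  match weight with
  | [] => 0
  | w0 :: rest =>
    (rest.foldl
      (fun (st : Int × Option Int) w =>
        match st with
        | (res, some m) => if w < m then (res + 1, none) else (res, some (max m w))
        | (res, none) => (res, some w))
      ((0 : Int), some w0)).1

-- ===== PRECONDITION & SPEC =====
-- Pre_ excludes only the empty list, on which both A and B raise IndexError.
def Pre_maxBalancedShipments (weight : List Int) : Prop := weight ≠ []
instance (weight : List Int) : Decidable (Pre_maxBalancedShipments weight) := by
  unfold Pre_maxBalancedShipments; infer_instance

def pvWitness_maxBalancedShipments : List Int := [3, 1, 2]

def Spec_maxBalancedShipments (weight : List Int) (out : Int) : Prop := out = maxBalancedShipments_alt weight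
instance (weight : List Int) (out : Int) : Decidable (Spec_maxBalancedShipments weight out) := by unfold Spec_maxBalancedShipments; infer_instance

-- ===== CLAIM (what is proved, stated in full; the proofs are below) =====
def Claim_equal_maxBalancedShipments : Prop := ∀ (weight : List Int), Dom_maxBalancedShipments weight → Pre_maxBalancedShipments weight → Spec_maxBalancedShipments weight (maxBalancedShipments weight)

-- ===== LEMMAS AND PROOFS =====

-- forward step (B's loop body) and backward step (A's loop body, element form)
def fstep (st : Int × Option Int) (x : Int) : Int × Option Int :=
  match st with
  | (res, some m) => if x < m then (res + 1, none) else (res, some (max m x))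
  | (res, none) => (res, some x)

def gstep (st : Int × Option Int) (x : Int) : Int × Option Int :=
  match st with
  | (res, some m) => if x > m then (res + 1, none) else (res, some x)
  | (res, none) => (res, some x)

-- forward greedy count, backward greedy count (recursive forms)
def Ffun : Option Int → List Int → Int
  | _, [] => 0
  | none, x :: xs => Ffun (some x) xs
  | some m, x :: xs => if x < m then 1 + Ffun none xs else Ffun (some (max m x)) xs

def Gfun : Option Int → List Int → Int
  | _, [] => 0
  | none, x :: xs => Gfun (some x) xs
  | some m, x :: xs => if x > m then 1 + Gfun none xs else Gfun (some x) xs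

-- backward pass over v (i.e. over v.reverse), consuming the head of v last
def Pfun : List Int → Int × Option Int
  | [] => (0, none)
  | x :: xs => gstep (Pfun xs) x

-- "threshold bump": by how much seeding the forward pass changes the count
def stepv (m : Int) : Option Int → Int
  | none => 0
  | some t => if m > t then 1 else 0

theorem Ffold (xs : List Int) : ∀ (r : Int) (a : Option Int),
    (List.foldl fstep (r, a) xs).1 = r + Ffun a xs := by
  induction xs with
  | nil => intro r a; simp [Ffun]
  | cons x xs ih =>
    intro r a
    cases a with
    | none => simpa [fstep, Ffun] using ih r (some x)
    | some m =>
      by_cases h : x < m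
      · simp [fstep, Ffun, h, ih]; ring
      · simp [fstep, Ffun, h, ih]

theorem Gfold (xs : List Int) : ∀ (r : Int) (a : Option Int),
    (List.foldl gstep (r, a) xs).1 = r + Gfun a xs := by
  induction xs with
  | nil => intro r a; simp [Gfun]
  | cons x xs ih =>
    intro r a
    cases a with
    | none => simpa [gstep, Gfun] using ih r (some x)
    | some m =>
      by_cases h : x > m
      · simp [gstep, Gfun, h, ih]; ring
      · simp [gstep, Gfun, h, ih]

theorem Pfun_eq (xs : List Int) : Pfun xs = List.foldl gstep (0, none) xs.reverse := by
  induction xs with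
  | nil => rfl
  | cons x xs ih => simp [Pfun, ih, List.foldl_append]

-- key lemma: seeding the forward greedy with m bumps the count by stepv m (Pfun xs).2
theorem Fstep (xs : List Int) : ∀ (m : Int),
    Ffun (some m) xs = Ffun none xs + stepv m (Pfun xs).2 := by
  induction xs with
  | nil => intro m; simp [Ffun, Pfun, stepv]
  | cons x xs ih =>
    intro m
    by_cases hxm : x < m
    · rcases h2 : (Pfun xs).2 with _ | t
      · simp [Ffun, Pfun, gstep, hxm, ih, h2, stepv]
        rcases hp : Pfun xs with ⟨c, o⟩
        rw [hp] at h2; cases h2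
        simp [gstep, stepv, hxm]; omega
      · by_cases hxt : x > t
        · simp only [Ffun, if_pos hxm, Pfun]
          rcases hp : Pfun xs with ⟨c, o⟩
          rw [hp] at h2; subst h2
          simp [gstep, stepv, hxt, ih, hp]; omega
        · simp only [Ffun, if_pos hxm, Pfun]
          rcases hp : Pfun xs with ⟨c, o⟩
          rw [hp] at h2; subst h2
          simp [gstep, stepv, hxt, ih, hp, hxm]; omega
    · have hmx : max m x = x := by omega
      simp only [Ffun, if_neg hxm, hmx, Pfun]
      rcases hp : Pfun xs with ⟨c, o⟩
      cases o with
      | none => simp [gstep, stepv]; omega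
      | some t =>
        by_cases hxt : x > t
        · simp [gstep, stepv, hxt]
        · simp [gstep, stepv, hxt]; omega

-- forward count = backward count
theorem FG (xs : List Int) : Ffun none xs = (Pfun xs).1 := by
  induction xs with
  | nil => rfl
  | cons x xs ih =>
    have h := Fstep xs x
    simp only [Ffun, Pfun] at *
    rcases hp : Pfun xs with ⟨c, o⟩
    rw [hp] at h ih
    cases o with
    | none => simp [gstep, stepv] at *; omega
    | some t =>
      by_cases hxt : x > t
      · simp [gstep, stepv, hxt] at *; omega
      · simp [gstep, stepv, hxt] at *; omega

-- (v.take (j+1)).reverse = v[j] :: (v.take j).reverse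
theorem take_succ_reverse (v : List Int) (j : Nat) (hj : j < v.length) :
    (v.take (j + 1)).reverse = v[j] :: (v.take j).reverse := by
  rw [List.take_add_one, List.getElem?_eq_getElem hj]
  simp

-- A's index loop from k down to 0 computes the backward greedy on [v[k],…,v[0]]
theorem Aidx (v : List Int) (k : Nat) (hk : k < v.length) : ∀ (r m : Int),
    ((PySem.List.pyRange (k : Int) (-1) (-1)).foldl (aStep v) (r, m, false)).1
      = r + Gfun (some m) ((v.take (k + 1)).reverse) := by
  induction k with
  | zero =>
    intro r m
    rw [PySem.List.pyRange_neg_one_cons (by omega)]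
    rw [show ((0 : Nat) : Int) - 1 = -1 by omega, PySem.List.pyRange_neg_one_eq_nil (by omega)]
    have h0 : PySem.List.pyGet? v 0 = some v[0] := by
      simp [PySem.List.pyGet?_zero, List.getElem?_eq_getElem, hk]
    rw [take_succ_reverse v 0 hk]
    by_cases h : v[0] > m
    · simp [aStep, h0, h, Gfun]
    · simp [aStep, h0, h, Gfun]
  | succ k ih =>
    intro r m
    have hk' : k < v.length := by omega
    rw [show ((k + 1 : Nat) : Int) = (k : Int) + 1 by push_cast; ring]
    rw [PySem.List.pyRange_neg_one_cons (by omega)]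
    rw [show (k : Int) + 1 - 1 = (k : Int) by ring]
    have hget : PySem.List.pyGet? v ((k : Int) + 1) = some v[k + 1] := by
      rw [show ((k : Int) + 1) = ((k + 1 : Nat) : Int) by push_cast; ring,
        PySem.List.pyGet?_natCast, List.getElem?_eq_getElem hk]
    have hgetk : PySem.List.pyGet? v ((k : Int) + 1 - 1) = some v[k] := by
      rw [show ((k : Int) + 1 - 1) = ((k : Nat) : Int) by push_cast; ring,
        PySem.List.pyGet?_natCast, List.getElem?_eq_getElem hk']
    rw [take_succ_reverse v (k + 1) hk]
    by_cases h : v[k + 1] > m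
    · have hne : ¬ ((k : Int) + 1 = 0) := by omega
      have : aStep v (r, m, false) ((k : Int) + 1) = (r + 1, v[k], false) := by
        simp [aStep, hget, hgetk, h, hne, List.getElem?_eq_getElem, hk']
      rw [List.foldl_cons, this, ih hk' (r + 1) v[k]]
      rw [take_succ_reverse v k hk']
      simp [Gfun, h]
      ring
    · have : aStep v (r, m, false) ((k : Int) + 1) = (r, v[k + 1], false) := by
        simp [aStep, hget, h]
      rw [List.foldl_cons, this, ih hk' r v[k + 1]]
      simp [Gfun, h]

-- B's port computes Ffun none
theorem alt_eq_Ffun (v : List Int) : maxBalancedShipments_alt v = Ffun none v := by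
  cases v with
  | nil => rfl
  | cons w0 rest =>
    have hfun : (fun (st : Int × Option Int) (w : Int) =>
        match st with
        | (res, some m) => if w < m then (res + 1, none) else (res, some (max m w))
        | (res, none) => (res, some w)) = fstep := by
      funext st w
      rcases st with ⟨r, _ | m⟩ <;> rfl
    show ((rest.foldl _ ((0 : Int), some w0)).1 : Int) = _
    rw [hfun, Ffold]
    simp [Ffun]

-- ===== VERDICT (by name: the statement is the Claim_ definition above) =====
theorem maxBalancedShipments_spec : Claim_equal_maxBalancedShipments := by
  intro v _ hpre
  unfold Spec_maxBalancedShipments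
  unfold Pre_maxBalancedShipments at hpre
  rw [alt_eq_Ffun, FG, Pfun_eq, Gfold]
  unfold maxBalancedShipments
  match v, hpre with
  | [x], _ =>
    simp [PySem.List.pyRange_neg_one_eq_nil, Gfun]
  | x :: y :: v', _ =>
    set w : List Int := x :: y :: v' with hw
    have hlen : 2 ≤ w.length := by simp [hw]
    have h2 : ((w.length : Int) - 2) = ((w.length - 2 : Nat) : Int) := by omega
    have hklt : w.length - 2 < w.length := by omega
    rw [h2, Aidx w (w.length - 2) hklt 0 ((PySem.List.pyGet? w (-1)).getD 0)]
    have hlast : PySem.List.pyGet? w (-1) = some (w.getLast (by simp [hw])) := by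
      rw [PySem.List.pyGet?_neg_one]
      simp [List.getLast?_eq_getLast_of_ne_nil]
    rw [hlast]
    have htake : w.take (w.length - 2 + 1) = w.dropLast := by
      have h3 : w.length - 2 + 1 = w.length - 1 := by omega
      rw [h3, List.dropLast_eq_take]
    rw [htake]
    have hsplit : w.reverse = w.getLast (by simp [hw]) :: w.dropLast.reverse := by
      conv_lhs => rw [← List.dropLast_concat_getLast (l := w) (by simp [hw])]
      simp
    rw [hsplit]
    simp [Gfun]
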